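-- pv_equiv track=rewrite | github.com/katqatran/CS-Python | listing.py | odds_or_evens
-- ===== SOURCE A (Python) =====
-- def odds_or_evens(numbers):
--     """
--     The function takes a list of numbers and returns a new list containing only odd or even values, depending on which
--     type of number occurs more frequently in the input list. The function determines the parity of each number using the
--     modulus operator and adds it to a new list accordingly. The function compares the lengths of the two new lists and
--     returns the list with more elements.
--     Arguments:
--         Numbers (list): A list of numbers.
--     Return Value:
--         list: A new list containing only odd or even values, depending on which type of number occurs more frequently in
--         the input list.
--     """
--     odd_list = []
--     even_list = []
--
--     for number in numbers:
--         if number % 2 == 1: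
--             odd_list.append(number)
--         else:
--             even_list.append(number)
--
--     if len(odd_list) > len(even_list):
--         return odd_list
--     return even_list
-- ===== SOURCE B (Python) =====
-- def odds_or_evens(numbers):
--     # Stable sort by parity key groups all evens (key 0) before all odds (key 1),
--     # each block keeping the original order; the boundary index splits the blocks,
--     # and the winning block (ties to evens) is returned as a slice.
--     ranked = sorted(numbers, key=lambda n: n % 2)
--     boundary = 0
--     while boundary < len(ranked) and ranked[boundary] % 2 != 1:
--         boundary += 1
--     if len(ranked) - boundary > boundary:
--         return ranked[boundary:]
--     return ranked[:boundary]
-- ===== Notes on version B (the rewrite author's own statement) =====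
-- stated objective: alternative
-- what changed: Replaces the dual-accumulator partition loop with sort-then-slice: a stable sort on the parity key groups evens before odds preserving order, a scan finds the block boundary, and the winning block is returned as a slice (ties to evens).
import Mathlib
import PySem

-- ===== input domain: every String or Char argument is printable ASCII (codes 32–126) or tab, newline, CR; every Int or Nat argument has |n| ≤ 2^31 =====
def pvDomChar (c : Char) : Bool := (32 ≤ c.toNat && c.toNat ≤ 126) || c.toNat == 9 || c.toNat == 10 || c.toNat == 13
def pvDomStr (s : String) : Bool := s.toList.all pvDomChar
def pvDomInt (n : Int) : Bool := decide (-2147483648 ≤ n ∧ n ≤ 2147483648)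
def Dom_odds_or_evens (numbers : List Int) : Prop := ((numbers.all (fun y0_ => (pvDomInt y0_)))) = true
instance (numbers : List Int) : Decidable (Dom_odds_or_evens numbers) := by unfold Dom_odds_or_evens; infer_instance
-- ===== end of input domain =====

-- B replaces A's dual-accumulator partition loop with sort-then-slice (stable sort on the
-- parity key, boundary scan, slice of the winning block); alternative algorithm, same result.

-- Python's 'n % 2' (exact for negative n: Python % takes the divisor's sign)
def pvParity (n : Int) : Int := PySem.Int.mod n 2

-- ===== PORT A =====
-- A: one loop appending each number to odd_list or even_list, then return the longer (ties to evens).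
def odds_or_evens (numbers : List Int) : List Int :=
  let acc := numbers.foldl
    (fun (p : List Int × List Int) number =>
      if pvParity number = 1 then (p.1 ++ [number], p.2)
      else (p.1, p.2 ++ [number]))
    ([], [])
  if acc.1.length > acc.2.length then acc.1 else acc.2

-- ===== PORT B =====
-- B's while loop: advance boundary past the leading block of non-odd elements.
def pvBoundary : List Int → Int
  | [] => 0
  | x :: xs => if pvParity x ≠ 1 then 1 + pvBoundary xs else 0

-- B: stable sort by parity key (evens block then odds block, original order kept),
-- scan for the boundary, return the winning block as a slice (ties to evens).
def odds_or_evens_alt (numbers : List Int) : List Int :=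
  let ranked := PySem.List.sorted numbers (fun n => pvParity n)
  let boundary := pvBoundary ranked
  if (ranked.length : Int) - boundary > boundary then
    PySem.List.slice ranked (some boundary) none
  else
    PySem.List.slice ranked none (some boundary)

-- ===== PRECONDITION & SPEC =====
def Spec_odds_or_evens (numbers : List Int) (out : List Int) : Prop := out = odds_or_evens_alt numbers
instance (numbers : List Int) (out : List Int) : Decidable (Spec_odds_or_evens numbers out) := by unfold Spec_odds_or_evens; infer_instance

-- ===== CLAIM (what is proved, stated in full; the proofs are below) =====
def Claim_equal_odds_or_evens : Prop := ∀ (numbers : List Int), Dom_odds_or_evens numbers → Spec_odds_or_evens numbers (odds_or_evens numbers)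

-- ===== LEMMAS AND PROOFS =====

theorem pvParity_cases (n : Int) : pvParity n = 0 ∨ pvParity n = 1 := by
  simp [pvParity, PySem.Int.mod, Int.fmod_eq_emod]; omega

-- A's fold, started from any pair of accumulators, appends the odd and even filters.
theorem odds_fold_eq (numbers : List Int) (o e : List Int) :
    numbers.foldl
      (fun (p : List Int × List Int) number =>
        if pvParity number = 1 then (p.1 ++ [number], p.2)
        else (p.1, p.2 ++ [number]))
      (o, e)
    = (o ++ numbers.filter (fun n => pvParity n = 1),
       e ++ numbers.filter (fun n => pvParity n ≠ 1)) := by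
  induction numbers generalizing o e with
  | nil => simp
  | cons x xs ih =>
    by_cases hx : pvParity x = 1 <;> simp [List.foldl_cons, hx, ih]

-- inserting an even element into evens-block ++ odds-block puts it at the end of the evens block
theorem insertBy_even (x : Int) (hx : pvParity x = 0) (E O : List Int)
    (hE : ∀ y ∈ E, pvParity y = 0) (hO : ∀ y ∈ O, pvParity y = 1) :
    PySem.List.insertBy (fun a b => decide (pvParity a < pvParity b)) x (E ++ O)
      = (E ++ [x]) ++ O := by
  induction E with
  | nil =>
    cases O with
    | nil => simp [PySem.List.insertBy]
    | cons o os =>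
      have ho : pvParity o = 1 := hO o (by simp)
      simp [PySem.List.insertBy, hx, ho]
  | cons e es ih =>
    have he : pvParity e = 0 := hE e (by simp)
    have : PySem.List.insertBy (fun a b => decide (pvParity a < pvParity b)) x (es ++ O)
        = (es ++ [x]) ++ O := ih (fun y hy => hE y (by simp [hy]))
    simp [PySem.List.insertBy, hx, he, this]

-- inserting an odd element appends it at the very end
theorem insertBy_odd (x : Int) (hx : pvParity x = 1) (L : List Int)
    (hL : ∀ y ∈ L, pvParity y ≤ 1) :
    PySem.List.insertBy (fun a b => decide (pvParity a < pvParity b)) x L = L ++ [x] := by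
  apply PySem.List.insertBy_of_forall_not_before
  intro y hy
  have := hL y hy
  simp; omega

-- the insertion-sort fold keeps the invariant "evens block ++ odds block, each in input order"
theorem fold_insert_eq (xs : List Int) (E O : List Int)
    (hE : ∀ y ∈ E, pvParity y = 0) (hO : ∀ y ∈ O, pvParity y = 1) :
    xs.foldl (fun acc x => PySem.List.insertBy (fun a b => decide (pvParity a < pvParity b)) x acc)
      (E ++ O)
    = (E ++ xs.filter (fun n => pvParity n ≠ 1)) ++ (O ++ xs.filter (fun n => pvParity n = 1)) := by
  induction xs generalizing E O with
  | nil => simp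
  | cons x xs ih =>
    rcases pvParity_cases x with hx | hx
    · have hstep := insertBy_even x hx E O hE hO
      have hrec := ih (E ++ [x]) O
        (fun y hy => by rcases List.mem_append.1 hy with h | h
                        · exact hE y h
                        · simp at h; simpa [h] using hx)
        hO
      rw [List.foldl_cons, hstep, hrec]
      simp [hx]
    · have hstep := insertBy_odd x hx (E ++ O)
        (fun y hy => by rcases List.mem_append.1 hy with h | h
                        · simp [hE y h]
                        · simp [hO y h])
      have hrec := ih E (O ++ [x]) hE
        (fun y hy => by rcases List.mem_append.1 hy with h | h
                        · exact hO y h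
                        · simp at h; simpa [h] using hx)
      rw [List.foldl_cons, hstep, List.append_assoc, ← List.append_assoc E, ← List.append_assoc,
        List.append_assoc E]
      rw [hrec]
      simp [hx]

-- stable sort by parity = evens (in order) ++ odds (in order)
theorem sorted_parity_eq (numbers : List Int) :
    PySem.List.sorted numbers (fun n => pvParity n)
      = numbers.filter (fun n => pvParity n ≠ 1) ++ numbers.filter (fun n => pvParity n = 1) := by
  have h := fold_insert_eq numbers [] [] (by simp) (by simp)
  simpa [PySem.List.sorted_eq_foldl_insertBy] using h

-- the boundary scan counts the leading evens block
theorem pvBoundary_eq (E O : List Int)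
    (hE : ∀ y ∈ E, pvParity y = 0) (hO : ∀ y ∈ O, pvParity y = 1) :
    pvBoundary (E ++ O) = (E.length : Int) := by
  induction E with
  | nil =>
    cases O with
    | nil => simp [pvBoundary]
    | cons o os => simp [pvBoundary, hO o (by simp)]
  | cons e es ih =>
    have he : pvParity e = 0 := hE e (by simp)
    have := ih (fun y hy => hE y (by simp [hy]))
    simp [pvBoundary, he, this]
    omega

-- ===== VERDICT (by name: the statement is the Claim_ definition above) =====
theorem odds_or_evens_spec : Claim_equal_odds_or_evens := by
  intro numbers _
  unfold Spec_odds_or_evens odds_or_evens odds_or_evens_alt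
  simp only [odds_fold_eq, List.nil_append]
  have hEall : ∀ y ∈ numbers.filter (fun n => pvParity n ≠ 1), pvParity y = 0 := by
    intro y hy
    have h2 := of_decide_eq_true (List.mem_filter.1 hy).2
    rcases pvParity_cases y with h | h
    · exact h
    · exact absurd h h2
  have hOall : ∀ y ∈ numbers.filter (fun n => pvParity n = 1), pvParity y = 1 := by
    intro y hy
    exact of_decide_eq_true (List.mem_filter.1 hy).2
  rw [sorted_parity_eq, pvBoundary_eq _ _ hEall hOall,
    PySem.List.slice_from_natCast, PySem.List.slice_to_natCast,
    List.drop_left, List.take_left]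
  simp only [List.length_append]
  split_ifs with h1 h2 h2 <;> first | rfl | omega
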